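-- pv_equiv track=rewrite | github.com/BartMassey/obquad | quads.py | quad_to_decimal
-- ===== SOURCE A (Python) =====
-- def quad_to_decimal(quad):
--     value = 0
--     for d in quad:
--         digit = ord(d) - ord('0')
--         if digit not in {0, 1, 2, 3}:
--             return None
--         value *= 4
--         value += digit
--     return str(value)
-- ===== SOURCE B (Python) =====
-- def quad_to_decimal(quad):
--     if any(d not in "0123" for d in quad):
--         return None
--     return str(sum((ord(d) - 48) * 4 ** i for i, d in enumerate(reversed(quad))))
-- ===== Notes on version B (the rewrite author's own statement) =====
-- stated objective: alternative
-- what changed: Replaces A's single left-to-right Horner loop with early return by two staged passes: a whole-string membership validation against the four valid digit characters first, then a positional sum of digit times a power of 4 over the reversed string.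
import Mathlib
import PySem

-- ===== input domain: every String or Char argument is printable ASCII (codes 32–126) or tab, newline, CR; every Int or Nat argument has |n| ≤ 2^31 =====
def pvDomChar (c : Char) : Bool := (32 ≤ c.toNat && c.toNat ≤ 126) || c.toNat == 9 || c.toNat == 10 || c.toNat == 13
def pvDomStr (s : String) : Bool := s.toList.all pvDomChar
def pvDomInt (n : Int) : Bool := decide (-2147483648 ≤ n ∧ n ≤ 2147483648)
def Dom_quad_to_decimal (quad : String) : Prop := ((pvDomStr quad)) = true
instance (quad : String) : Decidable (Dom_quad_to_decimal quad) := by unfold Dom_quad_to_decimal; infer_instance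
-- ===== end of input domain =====

-- B replaces A's single Horner loop with early return by two staged passes: validate every char against "0123", then sum digit * 4^i over the reversed string.

-- ===== PORT A =====
-- loop 'for d in quad' with early 'return None'; digit = ord(d) - ord('0')
def quadGoA : List Char → Int → Option String
  | [], value => some (PySem.Int.toStr value)
  | d :: rest, value =>
      let digit : Int := (d.toNat : Int) - 48
      if digit = 0 ∨ digit = 1 ∨ digit = 2 ∨ digit = 3 then
        quadGoA rest (value * 4 + digit)
      else
        none

def quad_to_decimal (quad : String) : Option String := quadGoA quad.toList 0

-- ===== PORT B =====
-- the literal "0123" that B tests membership against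
def quadValid : List Char := ['0', '1', '2', '3']

-- sum((ord(d) - 48) * 4**i for i, d in enumerate(reversed(quad)))
def quadSumB : List Char → Nat → Int
  | [], _ => 0
  | d :: rest, i => ((d.toNat : Int) - 48) * 4 ^ i + quadSumB rest (i + 1)

-- any(d not in "0123" for d in quad) → None; else str(sum …)
def quad_to_decimal_alt (quad : String) : Option String :=
  if quad.toList.any (fun d => !(quadValid.contains d)) then
    none
  else
    some (PySem.Int.toStr (quadSumB quad.toList.reverse 0))

-- ===== PRECONDITION & SPEC =====
def Spec_quad_to_decimal (quad : String) (out : Option String) : Prop := out = quad_to_decimal_alt quad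
instance (quad : String) (out : Option String) : Decidable (Spec_quad_to_decimal quad out) := by unfold Spec_quad_to_decimal; infer_instance

-- ===== CLAIM (what is proved, stated in full; the proofs are below) =====
def Claim_equal_quad_to_decimal : Prop := ∀ (quad : String), Dom_quad_to_decimal quad → Spec_quad_to_decimal quad (quad_to_decimal quad)

-- ===== LEMMAS AND PROOFS =====

def quadDig (c : Char) : Int := (c.toNat : Int) - 48

-- A char passes A's membership test iff it is one of '0'..'3'
lemma quad_ok_iff (c : Char) :
    (quadDig c = 0 ∨ quadDig c = 1 ∨ quadDig c = 2 ∨ quadDig c = 3) ↔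
      quadValid.contains c = true := by
  constructor
  · intro h
    have hv : c.toNat = 48 ∨ c.toNat = 49 ∨ c.toNat = 50 ∨ c.toNat = 51 := by
      simp only [quadDig] at h; omega
    have : c = '0' ∨ c = '1' ∨ c = '2' ∨ c = '3' := by
      rcases hv with h | h | h | h <;>
        [left; (right; left); (right; right; left); (right; right; right)] <;>
        · rw [← Char.ofNat_toNat c]
          simp only [Char.toNat] at h ⊢
          rw [h]
    rcases this with rfl | rfl | rfl | rfl <;> decide
  · intro h
    have hm : c ∈ quadValid := List.mem_of_elem_eq_true h
    have : c = '0' ∨ c = '1' ∨ c = '2' ∨ c = '3' := by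
      simpa [quadValid] using hm
    rcases this with rfl | rfl | rfl | rfl <;> decide

lemma quadGoA_ok : ∀ (l : List Char) (v : Int), (∀ c ∈ l, quadValid.contains c = true) →
    quadGoA l v = some (PySem.Int.toStr (l.foldl (fun v c => v * 4 + quadDig c) v)) := by
  intro l
  induction l with
  | nil => intro v _; rfl
  | cons d rest ih =>
      intro v h
      have hd := (quad_ok_iff d).mpr (h d List.mem_cons_self)
      simp only [quadGoA, quadDig] at *
      rw [if_pos hd, ih _ (fun c hc => h c (List.mem_cons_of_mem _ hc))]
      rfl

lemma quadGoA_bad : ∀ (l : List Char) (v : Int), (∃ c ∈ l, ¬ quadValid.contains c = true) →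
    quadGoA l v = none := by
  intro l
  induction l with
  | nil => intro v h; simp at h
  | cons d rest ih =>
      intro v h
      by_cases hd : quadValid.contains d = true
      · have : ∃ c ∈ rest, ¬ quadValid.contains c = true := by
          rcases h with ⟨c, hc, hbad⟩
          rcases List.mem_cons.mp hc with rfl | hc'
          · exact absurd hd hbad
          · exact ⟨c, hc', hbad⟩
        have hcase := (quad_ok_iff d).mpr hd
        simp only [quadGoA, quadDig] at *
        rw [if_pos hcase]
        exact ih _ this
      · have hcase : ¬ ((d.toNat : Int) - 48 = 0 ∨ (d.toNat : Int) - 48 = 1 ∨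
            (d.toNat : Int) - 48 = 2 ∨ (d.toNat : Int) - 48 = 3) := fun hc =>
          hd ((quad_ok_iff d).mp (by simpa [quadDig] using hc))
        simp only [quadGoA]
        rw [if_neg hcase]

lemma quadSumB_append : ∀ (xs : List Char) (d : Char) (i : Nat),
    quadSumB (xs ++ [d]) i = quadSumB xs i + quadDig d * 4 ^ (i + xs.length) := by
  intro xs
  induction xs with
  | nil => intro d i; simp [quadSumB, quadDig]
  | cons x rest ih =>
      intro d i
      simp only [List.cons_append, quadSumB, ih, List.length_cons]
      ring_nf

-- the positional sum over the reversal equals the Horner fold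
lemma quad_rev_eq_horner : ∀ (l : List Char) (v : Int),
    l.foldl (fun v c => v * 4 + quadDig c) v = v * 4 ^ l.length + quadSumB l.reverse 0 := by
  intro l
  induction l with
  | nil => intro v; simp [quadSumB]
  | cons d rest ih =>
      intro v
      simp only [List.foldl_cons, List.reverse_cons, List.length_cons]
      rw [ih, quadSumB_append]
      simp only [List.length_reverse]
      ring

-- ===== VERDICT (by name: the statement is the Claim_ definition above) =====
theorem quad_to_decimal_spec : Claim_equal_quad_to_decimal := by
  intro quad _
  unfold Spec_quad_to_decimal quad_to_decimal quad_to_decimal_alt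
  by_cases h : ∀ c ∈ quad.toList, quadValid.contains c = true
  · rw [quadGoA_ok _ _ h, if_neg]
    · rw [quad_rev_eq_horner]
      simp
    · intro hany
      simp only [List.any_eq_true] at hany
      obtain ⟨c, hc, hb⟩ := hany
      rw [h c hc] at hb
      simp at hb
  · rw [not_forall] at h
    obtain ⟨c, hc⟩ := h
    rw [Classical.not_imp] at hc
    obtain ⟨hmem, hb⟩ := hc
    rw [quadGoA_bad _ _ ⟨c, hmem, hb⟩, if_pos]
    simp only [List.any_eq_true]
    exact ⟨c, hmem, by simpa using hb⟩
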